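-- pv_equiv track=rewrite | github.com/djotaku/adventofcode | 2024/Day_02/Python/solution.py | apply_dampener_to_check_delta
-- ===== SOURCE A (Python) =====
-- def apply_dampener_to_check_delta(numbers: list[int]) -> (bool, list[int]):
--     """Keeps checking if removing one number would fix the same delta error."""
--     checks = len(numbers)
--     if check_delta(numbers): # would have passed anyway
--         return True, numbers
--     for position in range(checks):
--         modified_numbers = [
--             number for pos, number in enumerate(numbers) if pos != position
--         ]
--         if check_delta(modified_numbers):
--             return True, modified_numbers
--     return False, numbers
--
-- def check_delta(numbers: list[int])->bool:
--     """Check whether the delta between any 2 numbers is between 1-3 inclusive."""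
--     deltas = []
--     for (a,b) in zip(numbers, numbers[1:]):
--         if abs(a-b) in [1,2,3]:
--             deltas.append(True)
--         else:
--             deltas.append(False)
--     return all(deltas)
-- ===== SOURCE B (Python) =====
-- def apply_dampener_to_check_delta(numbers: list[int]) -> (bool, list[int]):
--     """Keeps checking if removing one number would fix the same delta error."""
--     bad = _first_bad_delta(numbers)
--     if bad is None:
--         return True, numbers
--     # Removing any element other than the two forming the first bad delta
--     # leaves that bad pair adjacent, so only these two removals can succeed.
--     for position in (bad, bad + 1):
--         modified_numbers = numbers[:position] + numbers[position + 1:]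
--         if _first_bad_delta(modified_numbers) is None:
--             return True, modified_numbers
--     return False, numbers
--
-- def _first_bad_delta(numbers):
--     """Index of the first adjacent pair whose |delta| is not 1-3, else None."""
--     for i in range(len(numbers) - 1):
--         if not 1 <= abs(numbers[i] - numbers[i + 1]) <= 3:
--             return i
--     return None
-- ===== Notes on version B (the rewrite author's own statement) =====
-- stated objective: faster
-- what changed: Instead of re-checking the whole list after removing each of the n positions, B finds the first adjacent pair whose |delta| is outside 1-3 and tests only the two removals (that index and the next) that can possibly repair it.
import Mathlib
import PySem

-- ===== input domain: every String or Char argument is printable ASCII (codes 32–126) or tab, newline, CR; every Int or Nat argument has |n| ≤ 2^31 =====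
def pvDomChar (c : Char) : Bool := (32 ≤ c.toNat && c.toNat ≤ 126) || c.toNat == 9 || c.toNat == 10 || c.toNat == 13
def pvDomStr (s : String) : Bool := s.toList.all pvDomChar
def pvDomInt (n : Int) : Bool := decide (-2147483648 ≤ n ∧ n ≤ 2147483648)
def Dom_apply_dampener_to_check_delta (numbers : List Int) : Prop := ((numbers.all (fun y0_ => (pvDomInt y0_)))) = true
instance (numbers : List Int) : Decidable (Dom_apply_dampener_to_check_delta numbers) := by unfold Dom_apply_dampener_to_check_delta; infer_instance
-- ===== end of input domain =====

-- B replaces A's try-every-position scan by locating the first bad adjacent delta and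
-- testing only the two removals that can repair it (objective: faster).

-- ===== PORT A =====
-- port of helper check_delta: builds the list of per-pair booleans, then all()
def check_delta (numbers : List Int) : Bool :=
  let deltas := (numbers.zip (PySem.List.slice numbers (some 1) none)).foldl
      (fun acc ab => acc ++ [if |ab.1 - ab.2| ∈ ([1, 2, 3] : List Int) then true else false])
      ([] : List Bool)
  deltas.all id

-- the 'for position in range(checks)' loop of A
def aLoop (numbers : List Int) : List Int → Bool × List Int
  | [] => (false, numbers)
  | p :: rest =>
      let modified := ((PySem.List.enumerate numbers 0).filter (fun pn => pn.1 != p)).map (·.2)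
      if check_delta modified then (true, modified) else aLoop numbers rest

def apply_dampener_to_check_delta (numbers : List Int) : Bool × List Int :=
  let checks : Int := numbers.length
  if check_delta numbers then (true, numbers)
  else aLoop numbers (PySem.List.pyRange 0 checks 1)

-- ===== PORT B =====
-- index of the first adjacent pair whose |delta| is outside 1..3, in one pass
def firstBadDelta : List Int → Option Int
  | a :: b :: t =>
      if ¬ (1 ≤ |a - b| ∧ |a - b| ≤ 3) then some 0
      else (firstBadDelta (b :: t)).map (· + 1)
  | _ => none

def apply_dampener_to_check_delta_alt (numbers : List Int) : Bool × List Int :=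
  match firstBadDelta numbers with
  | none => (true, numbers)
  | some bad =>
      let m1 := PySem.List.slice numbers none (some bad) ++
                PySem.List.slice numbers (some (bad + 1)) none
      if (firstBadDelta m1).isNone then (true, m1)
      else
        let m2 := PySem.List.slice numbers none (some (bad + 1)) ++
                  PySem.List.slice numbers (some (bad + 2)) none
        if (firstBadDelta m2).isNone then (true, m2) else (false, numbers)

-- ===== PRECONDITION & SPEC =====
def Spec_apply_dampener_to_check_delta (numbers : List Int) (out : Bool × List Int) : Prop := out = apply_dampener_to_check_delta_alt numbers
instance (numbers : List Int) (out : Bool × List Int) : Decidable (Spec_apply_dampener_to_check_delta numbers out) := by unfold Spec_apply_dampener_to_check_delta; infer_instance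

-- ===== CLAIM (what is proved, stated in full; the proofs are below) =====
def Claim_equal_apply_dampener_to_check_delta : Prop := ∀ (numbers : List Int), Dom_apply_dampener_to_check_delta numbers → Spec_apply_dampener_to_check_delta numbers (apply_dampener_to_check_delta numbers)

-- ===== LEMMAS AND PROOFS =====

-- structural characterisation of check_delta
def chk : List Int → Bool
  | a :: b :: t => (decide (1 ≤ |a - b| ∧ |a - b| ≤ 3)) && chk (b :: t)
  | _ => true

theorem cond_eq (a b : Int) :
    (if |a - b| ∈ ([1,2,3] : List Int) then true else false) = decide (1 ≤ |a - b| ∧ |a - b| ≤ 3) := by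
  have h : |a - b| ∈ ([1,2,3] : List Int) ↔ (1 ≤ |a - b| ∧ |a - b| ≤ 3) := by
    simp [List.mem_cons]; omega
  by_cases hc : 1 ≤ |a - b| ∧ |a - b| ≤ 3 <;> simp [h, hc]

theorem zip_all_chk : ∀ l : List Int,
    (l.zip l.tail).all (fun ab => if |ab.1 - ab.2| ∈ ([1,2,3] : List Int) then true else false) = chk l
  | [] => rfl
  | [_] => rfl
  | a :: b :: t => by
      simp only [List.tail_cons, List.zip_cons_cons, List.all_cons, chk]
      rw [cond_eq]
      congr 1
      exact zip_all_chk (b :: t)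

theorem check_delta_eq_chk (l : List Int) : check_delta l = chk l := by
  unfold check_delta
  rw [PySem.List.slice_from_one, PySem.List.foldl_append_singleton_eq_map]
  simp only [List.nil_append, List.all_map]
  exact zip_all_chk l

theorem firstBadDelta_none_iff : ∀ l : List Int, firstBadDelta l = none ↔ chk l = true
  | [] => by simp [firstBadDelta, chk]
  | [_] => by simp [firstBadDelta, chk]
  | a :: b :: t => by
      rw [firstBadDelta, chk]
      by_cases h : 1 ≤ |a - b| ∧ |a - b| ≤ 3
      · simp [h, firstBadDelta_none_iff (b :: t)]
      · simp [h]

theorem firstBadDelta_spec : ∀ (l : List Int) (i : Int), firstBadDelta l = some i →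
    0 ≤ i ∧ ∃ x y, l[i.toNat]? = some x ∧ l[i.toNat + 1]? = some y ∧
      ¬ (1 ≤ |x - y| ∧ |x - y| ≤ 3)
  | a :: b :: t, i => by
      rw [firstBadDelta]
      by_cases h : 1 ≤ |a - b| ∧ |a - b| ≤ 3
      · rw [if_neg (not_not_intro h)]
        intro hmap
        obtain ⟨j, hj, rfl⟩ := Option.map_eq_some_iff.mp hmap
        obtain ⟨hj0, x, y, hx, hy, hbad⟩ := firstBadDelta_spec (b :: t) j hj
        refine ⟨by omega, x, y, ?_, ?_, hbad⟩
        · have : (j + 1).toNat = j.toNat + 1 := by omega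
          rw [this]; simpa using hx
        · have : (j + 1).toNat + 1 = (j.toNat + 1) + 1 := by omega
          rw [this]; simpa using hy
      · rw [if_pos h]
        intro hsome
        obtain rfl : (0 : Int) = i := Option.some_inj.mp hsome
        exact ⟨le_refl 0, a, b, by simp, by simp, h⟩
  | [], i => by simp [firstBadDelta]
  | [_], i => by simp [firstBadDelta]

theorem chk_false_of_badpair : ∀ (l : List Int) (j : Nat) (x y : Int),
    l[j]? = some x → l[j+1]? = some y →
    ¬ (1 ≤ |x - y| ∧ |x - y| ≤ 3) → chk l = false
  | a :: b :: t, 0, x, y => by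
      intro hx hy hbad
      simp at hx hy; subst hx; subst hy
      simp [chk, hbad]
  | a :: b :: t, j+1, x, y => by
      intro hx hy hbad
      have := chk_false_of_badpair (b :: t) j x y (by simpa using hx) (by simpa using hy) hbad
      simp [chk, this]
  | [], j, x, y => by intro hx; simp at hx
  | [_], j, x, y => by intro hx hy; simp at hy

-- removing any position other than k, k+1 leaves the bad pair at k adjacent
theorem chk_eraseIdx_false (l : List Int) (k p : Nat) (x y : Int)
    (hx : l[k]? = some x) (hy : l[k+1]? = some y)
    (hbad : ¬ (1 ≤ |x - y| ∧ |x - y| ≤ 3))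
    (hp1 : p ≠ k) (hp2 : p ≠ k + 1) : chk (l.eraseIdx p) = false := by
  rcases Nat.lt_or_ge p k with hpk | hpk
  · apply chk_false_of_badpair (l.eraseIdx p) (k-1) x y
    · rw [List.getElem?_eraseIdx, if_neg (by omega)]
      have : k - 1 + 1 = k := by omega
      rw [this]; exact hx
    · rw [List.getElem?_eraseIdx, if_neg (by omega)]
      have : k - 1 + 1 + 1 = k + 1 := by omega
      rw [this]; exact hy
    · exact hbad
  · apply chk_false_of_badpair (l.eraseIdx p) k x y
    · rw [List.getElem?_eraseIdx, if_pos (by omega)]; exact hx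
    · rw [List.getElem?_eraseIdx, if_pos (by omega)]; exact hy
    · exact hbad

-- enumerate fst are all ≥ s, so filtering out an index t < s keeps everything
theorem enum_filter_all : ∀ (l : List Int) (s t : Int), t < s →
    ((PySem.List.enumerate l s).filter (fun pn => pn.1 != t)).map (·.2) = l
  | [], s, t, h => by simp [PySem.List.enumerate_nil]
  | a :: l, s, t, h => by
      rw [PySem.List.enumerate_cons, List.filter_cons]
      rw [if_pos (by simpa using (by omega : s ≠ t))]
      simp only [List.map_cons]
      rw [enum_filter_all l (s+1) t (by omega)]

theorem enum_filter_erase : ∀ (l : List Int) (s : Int) (p : Nat),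
    ((PySem.List.enumerate l s).filter (fun pn => pn.1 != (s + p))).map (·.2) = l.eraseIdx p
  | [], s, p => by simp [PySem.List.enumerate_nil]
  | a :: l, s, 0 => by
      rw [PySem.List.enumerate_cons, List.filter_cons]
      rw [if_neg (by simp)]
      simp only [Nat.cast_zero, add_zero, List.eraseIdx_cons_zero]
      exact enum_filter_all l (s+1) s (by omega)
  | a :: l, s, p+1 => by
      rw [PySem.List.enumerate_cons, List.filter_cons]
      rw [if_pos (by simp; omega)]
      simp only [List.map_cons, List.eraseIdx_cons_succ]
      have hc : s + ((p+1 : Nat) : Int) = (s+1) + (p : Int) := by push_cast; ring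
      rw [hc, enum_filter_erase l (s+1) p]

-- A's comprehension removes exactly index p
theorem enum_filter_eraseIdx (l : List Int) (p : Nat) :
    ((PySem.List.enumerate l 0).filter (fun pn => pn.1 != (p : Int))).map (·.2) = l.eraseIdx p := by
  simpa using enum_filter_erase l 0 p

theorem aLoop_skip (numbers : List Int) (ps qs : List Int)
    (h : ∀ p ∈ ps, check_delta (((PySem.List.enumerate numbers 0).filter (fun pn => pn.1 != p)).map (·.2)) = false) :
    aLoop numbers (ps ++ qs) = aLoop numbers qs := by
  induction ps with
  | nil => simp
  | cons p ps ih =>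
      rw [List.cons_append, aLoop]
      simp only [h p (List.mem_cons_self)]
      exact ih (fun q hq => h q (List.mem_cons_of_mem _ hq))

-- ===== VERDICT (by name: the statement is the Claim_ definition above) =====
theorem apply_dampener_to_check_delta_spec : Claim_equal_apply_dampener_to_check_delta := by
  intro numbers _
  unfold Spec_apply_dampener_to_check_delta
  unfold apply_dampener_to_check_delta apply_dampener_to_check_delta_alt
  cases hfb : firstBadDelta numbers with
  | none =>
      rw [if_pos (by rw [check_delta_eq_chk]; exact (firstBadDelta_none_iff numbers).mp hfb)]
  | some i =>
      obtain ⟨hi0, x, y, hx, hy, hbad⟩ := firstBadDelta_spec numbers i hfb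
      set k := i.toNat with hk
      have hklen : k + 1 < numbers.length := by
        have := List.getElem?_eq_some_iff.mp hy
        exact this.1
      have hchkF : chk numbers = false := chk_false_of_badpair numbers k x y hx hy hbad
      rw [if_neg (by rw [check_delta_eq_chk, hchkF]; simp)]
      dsimp only
      -- reduce B's two candidate lists to eraseIdx
      have hm1 : PySem.List.slice numbers none (some i) ++
                 PySem.List.slice numbers (some (i + 1)) none = numbers.eraseIdx k := by
        rw [PySem.List.slice_to numbers hi0, PySem.List.slice_from numbers (by omega)]
        rw [show (i+1).toNat = k + 1 by omega]
        exact (List.eraseIdx_eq_take_drop_succ numbers k).symm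
      have hm2 : PySem.List.slice numbers none (some (i + 1)) ++
                 PySem.List.slice numbers (some (i + 2)) none = numbers.eraseIdx (k+1) := by
        rw [PySem.List.slice_to numbers (by omega), PySem.List.slice_from numbers (by omega)]
        rw [show (i+1).toNat = k + 1 by omega, show (i+2).toNat = k + 2 by omega]
        exact (List.eraseIdx_eq_take_drop_succ numbers (k+1)).symm
      -- split A's position range: [0..k) all fail, then k, k+1, then (k+1..n) all fail
      have hlen : (k : Int) + 2 ≤ (numbers.length : Int) := by omega
      rw [PySem.List.pyRange_one_append 0 (k : Int) (numbers.length : Int) (by omega) (by omega)]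
      rw [aLoop_skip numbers _ _ ?lowfail]
      case lowfail =>
        intro p hp
        rw [PySem.List.mem_pyRange_one] at hp
        rw [show p = ((p.toNat : Nat) : Int) by omega, enum_filter_eraseIdx]
        rw [check_delta_eq_chk]
        exact chk_eraseIdx_false numbers k p.toNat x y hx hy hbad (by omega) (by omega)
      rw [PySem.List.pyRange_one_cons (by omega : (k:Int) < (numbers.length : Int)), aLoop]
      rw [show ((k : Int)) = (((k : Nat) : Int)) from rfl, enum_filter_eraseIdx numbers k]
      rw [check_delta_eq_chk]
      by_cases h1 : chk (numbers.eraseIdx k) = true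
      · -- first candidate passes on both sides
        rw [if_pos h1, hm1]
        rw [if_pos (by rw [Option.isNone_iff_eq_none, firstBadDelta_none_iff]; exact h1)]
      · have h1f : chk (numbers.eraseIdx k) = false := by
          cases hc : chk (numbers.eraseIdx k) <;> simp_all
        rw [if_neg (by simp [h1f])]
        have hB1 : (firstBadDelta (PySem.List.slice numbers none (some i) ++
                 PySem.List.slice numbers (some (i + 1)) none)).isNone = false := by
          rw [hm1]
          cases hfb1 : firstBadDelta (numbers.eraseIdx k)
          · exact absurd ((firstBadDelta_none_iff _).mp hfb1) (by simp [h1f])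
          · rfl
        rw [hB1, if_neg (by simp)]
        rw [PySem.List.pyRange_one_cons (by omega : (k:Int)+1 < (numbers.length : Int)), aLoop]
        rw [show ((k : Int) + 1) = (((k + 1 : Nat) : Int)) by push_cast; ring, enum_filter_eraseIdx numbers (k+1)]
        rw [check_delta_eq_chk]
        by_cases h2 : chk (numbers.eraseIdx (k+1)) = true
        · rw [if_pos h2, hm2]
          rw [if_pos (by rw [Option.isNone_iff_eq_none, firstBadDelta_none_iff]; exact h2)]
        · have h2f : chk (numbers.eraseIdx (k+1)) = false := by
            cases hc : chk (numbers.eraseIdx (k+1)) <;> simp_all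
          rw [if_neg (by simp [h2f])]
          have hB2 : (firstBadDelta (PySem.List.slice numbers none (some (i+1)) ++
                   PySem.List.slice numbers (some (i + 2)) none)).isNone = false := by
            rw [hm2]
            cases hfb2 : firstBadDelta (numbers.eraseIdx (k+1))
            · exact absurd ((firstBadDelta_none_iff _).mp hfb2) (by simp [h2f])
            · rfl
          rw [hB2, if_neg (by simp)]
          -- all remaining positions fail too
          rw [show (((k+1 : Nat) : Int) + 1) = ((k : Int) + 2) from by push_cast; ring]
          rw [← List.append_nil (PySem.List.pyRange ((k : Int) + 2) (numbers.length : Int))]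
          rw [aLoop_skip numbers _ _ ?highfail]
          case highfail =>
            intro p hp
            rw [PySem.List.mem_pyRange_one] at hp
            rw [show p = ((p.toNat : Nat) : Int) by omega, enum_filter_eraseIdx]
            rw [check_delta_eq_chk]
            exact chk_eraseIdx_false numbers k p.toNat x y hx hy hbad (by omega) (by omega)
          rfl
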